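-- pv_equiv track=rewrite | github.com/chukarsten/DrugDiscoverAI | model_picker.py | find_smallest_local_model
-- ===== SOURCE A (Python) =====
-- def find_smallest_local_model(available_model_dict):
--     smallest_models = [model for model in available_model_dict if available_model_dict[model] == min(available_model_dict.values())]
--     smallest_model = None
--     if len(smallest_models) == 1:
--         smallest_model = smallest_models[0]
--     else:
--         smallest_model = smallest_models[0]
--     return smallest_model
-- ===== SOURCE B (Python) =====
-- def find_smallest_local_model(available_model_dict):
--     items = iter(available_model_dict.items())
--     try:
--         best_key, best_val = next(items)
--     except StopIteration:
--         raise ValueError("empty model dict")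
--     for key, val in items:
--         if val < best_val:
--             best_key, best_val = key, val
--     return best_key
-- ===== Notes on version B (the rewrite author's own statement) =====
-- stated objective: faster
-- what changed: A recomputes min(values) inside a comprehension for every key and then filters keys by dict lookup (quadratic, min-then-filter); B is one linear pass over items() keeping a running (best_key, best_val) with a strict '<' update so the first key wins ties.
import Mathlib
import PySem

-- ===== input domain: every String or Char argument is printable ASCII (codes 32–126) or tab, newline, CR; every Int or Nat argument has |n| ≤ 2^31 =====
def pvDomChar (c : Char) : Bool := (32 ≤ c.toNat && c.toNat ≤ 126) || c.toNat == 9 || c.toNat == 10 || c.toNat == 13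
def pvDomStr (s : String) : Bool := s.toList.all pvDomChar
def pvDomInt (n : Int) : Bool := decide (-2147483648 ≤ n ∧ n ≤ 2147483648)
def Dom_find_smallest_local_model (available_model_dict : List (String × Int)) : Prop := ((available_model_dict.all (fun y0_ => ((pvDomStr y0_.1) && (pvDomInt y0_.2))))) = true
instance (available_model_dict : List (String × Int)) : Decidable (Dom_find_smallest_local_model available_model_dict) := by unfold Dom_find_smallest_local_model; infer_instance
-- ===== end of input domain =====

-- B is one running-minimum pass over the items instead of A's min-then-filter comprehension; simpler and linear.

-- ===== PORT A =====
-- 'available_model_dict[model]' is Python's dict lookup = first match in the assoc list: List.lookup.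
-- 'min(available_model_dict.values())' → PySem.List.min? (raises ValueError on empty, i.e. none; but
-- on an empty dict the comprehension is empty and min is never called, so A fails at smallest_models[0]
-- with IndexError — ported as head? = none, default "" outside Pre_).
def find_smallest_local_model (available_model_dict : List (String × Int)) : String :=
  let smallest_models := (available_model_dict.map Prod.fst).filter (fun model =>
    match List.lookup model available_model_dict,
          PySem.List.min? (available_model_dict.map Prod.snd) (fun y => y) with
    | some v, some mn => v == mn
    | _, _ => false)
  match smallest_models.head? with
  | some s => s
  | none => ""  -- smallest_models[0] raises IndexError here (empty dict); excluded by Pre_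

-- ===== PORT B =====
-- running minimum: first item initializes (best_key, best_val); strictly smaller value replaces it.
def find_smallest_local_model_alt (available_model_dict : List (String × Int)) : String :=
  match available_model_dict with
  | [] => ""  -- B raises ValueError here; excluded by Pre_
  | first :: rest =>
    (rest.foldl (fun best kv => if kv.2 < best.2 then kv else best) first).1

-- ===== PRECONDITION & SPEC =====
-- Pre_ excludes the empty list (A raises IndexError at smallest_models[0], B raises ValueError) and
-- assoc lists with duplicate keys, which cannot arise from a Python dict argument.
def Pre_find_smallest_local_model (available_model_dict : List (String × Int)) : Prop :=
  available_model_dict ≠ [] ∧ (available_model_dict.map Prod.fst).Nodup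

instance (available_model_dict : List (String × Int)) : Decidable (Pre_find_smallest_local_model available_model_dict) := by unfold Pre_find_smallest_local_model; infer_instance

def pvWitness_find_smallest_local_model : (List (String × Int)) := [("a", 3), ("b", 1), ("c", 1)]

def Spec_find_smallest_local_model (available_model_dict : List (String × Int)) (out : String) : Prop := out = find_smallest_local_model_alt available_model_dict
instance (available_model_dict : List (String × Int)) (out : String) : Decidable (Spec_find_smallest_local_model available_model_dict out) := by unfold Spec_find_smallest_local_model; infer_instance

-- ===== CLAIM (what is proved, stated in full; the proofs are below) =====
def Claim_equal_find_smallest_local_model : Prop := ∀ (available_model_dict : List (String × Int)), Dom_find_smallest_local_model available_model_dict → Pre_find_smallest_local_model available_model_dict → Spec_find_smallest_local_model available_model_dict (find_smallest_local_model available_model_dict)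

-- ===== LEMMAS AND PROOFS =====

-- the running-minimum step of B
def pvStep (best kv : String × Int) : String × Int := if kv.2 < best.2 then kv else best

-- value of the running minimum = fold of min over the values
theorem pvStep_snd (l : List (String × Int)) : ∀ b : String × Int,
    (l.foldl pvStep b).2 = (l.map Prod.snd).foldl min b.2 := by
  induction l with
  | nil => intro b; rfl
  | cons x t ih =>
    intro b
    simp only [List.foldl_cons, List.map_cons, ih]
    congr 1
    simp only [pvStep, min_def]
    split_ifs <;> simp_all
    omega

-- the running minimum's value is ≤ the seed's value
theorem pvStep_le (l : List (String × Int)) : ∀ b : String × Int,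
    (l.foldl pvStep b).2 ≤ b.2 := by
  induction l with
  | nil => intro b; exact le_refl _
  | cons x t ih =>
    intro b
    simp only [List.foldl_cons]
    refine le_trans (ih (pvStep b x)) ?_
    simp only [pvStep]; split_ifs with h
    · exact le_of_lt h
    · exact le_refl _

-- the running minimum is the FIRST element of b :: l attaining its (minimal) value
theorem pvStep_find (l : List (String × Int)) : ∀ b : String × Int,
    (b :: l).find? (fun p => p.2 == (l.foldl pvStep b).2) = some (l.foldl pvStep b) := by
  induction l with
  | nil => intro b; simp [List.find?]
  | cons x t ih =>
    intro b
    simp only [List.foldl_cons]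
    by_cases hx : x.2 < b.2
    · have hstep : pvStep b x = x := by simp [pvStep, hx]
      rw [hstep]
      have hr : (t.foldl pvStep x).2 ≤ x.2 := pvStep_le t x
      have hb : (b.2 == (t.foldl pvStep x).2) = false := by
        simp only [beq_eq_false_iff_ne, ne_eq]
        omega
      rw [List.find?_cons_of_neg (by simp [hb]), ← hstep, hstep]
      exact ih x
    · have hstep : pvStep b x = b := by simp [pvStep, hx]
      rw [hstep]
      have hIH := ih b
      have hr : (t.foldl pvStep b).2 ≤ b.2 := pvStep_le t b
      by_cases hb : b.2 = (t.foldl pvStep b).2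
      · have : (t.foldl pvStep b) = b := by
          have := List.find?_cons_of_pos (l := t) (a := b)
            (p := fun p => p.2 == (t.foldl pvStep b).2) (h := by simp [hb])
          rw [this] at hIH
          exact (Option.some_injective _ hIH).symm
        rw [List.find?_cons_of_pos (by simp [hb]), this]
      · have hxne : (x.2 == (t.foldl pvStep b).2) = false := by
          simp only [beq_eq_false_iff_ne, ne_eq]
          intro hx2
          omega
        rw [List.find?_cons_of_neg (by simp [hb])] at hIH ⊢
        rw [List.find?_cons_of_neg (by simp [hxne])]
        exact hIH
  -- (hxne: x.2 ≥ b.2 and run ≤ b.2, b.2 ≠ run, so x.2 ≠ run)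

-- with nodup keys, looking up a member pair's key yields its own value
theorem pvLookup_self {d : List (String × Int)} (h : (d.map Prod.fst).Nodup) :
    ∀ kv ∈ d, List.lookup kv.1 d = some kv.2 := by
  induction d with
  | nil => intro kv hkv; cases hkv
  | cons x t ih =>
    intro kv hkv
    simp only [List.map_cons, List.nodup_cons] at h
    rw [List.mem_cons] at hkv
    rcases hkv with h1 | h2
    · subst h1; simp [List.lookup]
    · have hne : (kv.1 == x.1) = false := by
        simp only [beq_eq_false_iff_ne, ne_eq]
        intro he
        exact h.1 (he ▸ List.mem_map_of_mem h2)
      simp only [List.lookup, hne]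
      exact ih h.2 kv h2

theorem find_smallest_local_model_eq (d : List (String × Int))
    (hne : d ≠ []) (hnd : (d.map Prod.fst).Nodup) :
    find_smallest_local_model d = find_smallest_local_model_alt d := by
  obtain ⟨b, l, rfl⟩ : ∃ b t, d = b :: t := by
    cases d with
    | nil => exact absurd rfl hne
    | cons b t => exact ⟨b, t, rfl⟩
  unfold find_smallest_local_model find_smallest_local_model_alt
  have hmin : PySem.List.min? ((b :: l).map Prod.snd) (fun y => y)
      = some ((l.foldl pvStep b).2) := by
    rw [List.map_cons, PySem.List.min?_id_cons, pvStep_snd]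
  simp only [hmin]
  rw [List.filter_map, List.filter_congr (q := fun p => p.2 == (l.foldl pvStep b).2)
      (by
        intro kv hkv
        simp only [Function.comp]
        rw [pvLookup_self hnd kv hkv]),
    List.head?_map, List.head?_filter, pvStep_find]
  rfl

-- ===== VERDICT (by name: the statement is the Claim_ definition above) =====
theorem find_smallest_local_model_spec : Claim_equal_find_smallest_local_model := by
  intro d _ hpre
  exact find_smallest_local_model_eq d hpre.1 hpre.2
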